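-- pv_equiv track=rewrite | github.com/haolunc/ARC-RL | reference_solutions/solutions/99fa7670.py | transform
-- ===== SOURCE A (Python) =====
-- def transform(grid):
--
--     rows = len(grid)
--     cols = len(grid[0]) if rows else 0
--
--     out = [row[:] for row in grid]
--
--     for r in range(rows):
--         for c in range(cols):
--             v = grid[r][c]
--             if v == 0:
--                 continue
--
--             for k in range(c, cols):
--                 out[r][k] = v
--
--             for i in range(r, rows):
--                 out[i][cols - 1] = v
--
--     return out
-- ===== SOURCE B (Python) =====
-- def transform(grid):
--     rows = len(grid)
--     cols = len(grid[0]) if rows else 0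
--     out = []
--     last = 0
--     seen = False
--     for row in grid:
--         new = row[:]
--         cur = 0
--         cur_seen = False
--         for c in range(cols):
--             v = row[c]
--             if v != 0:
--                 cur = v
--                 cur_seen = True
--                 last = v
--                 seen = True
--             if cur_seen:
--                 new[c] = cur
--         if seen:
--             new[cols - 1] = last
--         out.append(new)
--     return out
-- ===== Notes on version B (the rewrite author's own statement) =====
-- stated objective: faster
-- what changed: A refills a whole row suffix and a whole last-column suffix for every nonzero cell (O(R*C*(R+C))); B makes one row-major pass carrying the current row's forward-fill value and the last nonzero seen so far for the final column (O(R*C)).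
import Mathlib
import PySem

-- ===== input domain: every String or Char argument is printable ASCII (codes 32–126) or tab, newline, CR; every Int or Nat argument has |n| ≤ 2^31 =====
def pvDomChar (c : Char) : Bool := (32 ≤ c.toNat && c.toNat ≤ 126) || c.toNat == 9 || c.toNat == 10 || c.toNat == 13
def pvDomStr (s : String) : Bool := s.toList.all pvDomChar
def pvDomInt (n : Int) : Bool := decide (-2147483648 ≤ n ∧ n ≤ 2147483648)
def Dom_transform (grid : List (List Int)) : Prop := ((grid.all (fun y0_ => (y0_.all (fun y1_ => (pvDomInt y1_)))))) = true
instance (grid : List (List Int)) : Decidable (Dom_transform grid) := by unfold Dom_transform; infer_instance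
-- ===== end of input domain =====

-- B replaces A's per-nonzero-cell refilling (O(R·C·(R+C))) by a single row-major pass
-- carrying the forward-fill value within each row and the last nonzero seen so far for the
-- final column (O(R·C)).

-- number of columns: len(grid[0]) if grid else 0
def pyCols (grid : List (List Int)) : Nat :=
  match grid with
  | [] => 0
  | h :: _ => h.length

-- ===== PORT A =====
-- for k in range(c, cols): out[r][k] = v
def rowFillA (r c cols : Nat) (v : Int) (out : List (List Int)) : List (List Int) :=
  (List.range' c (cols - c)).foldl (fun out k => out.modify r (fun row => row.set k v)) out

-- for i in range(r, rows): out[i][cols - 1] = v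
def colFillA (r rows cols : Nat) (v : Int) (out : List (List Int)) : List (List Int) :=
  (List.range' r (rows - r)).foldl (fun out i => out.modify i (fun row => row.set (cols - 1) v)) out

-- the body of the outer loop: for c in range(cols): …
def innerA (row : List Int) (r rows cols : Nat) (out : List (List Int)) : List (List Int) :=
  (List.range cols).foldl (fun out c =>
    let v := row.getD c 0
    if v = 0 then out
    else colFillA r rows cols v (rowFillA r c cols v out)) out

def transform (grid : List (List Int)) : List (List Int) :=
  let rows := grid.length
  let cols := pyCols grid
  (List.range rows).foldl (fun out r => innerA (grid.getD r []) r rows cols out) grid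

-- ===== PORT B =====
-- the body of B's inner loop over c (state: new, cur, cur_seen, last, seen)
def stepBInner (row : List Int) (s : List Int × Int × Bool × Int × Bool) (c : Nat) :
    List Int × Int × Bool × Int × Bool :=
  let v := row.getD c 0
  let t := if v = 0 then (s.2.1, s.2.2.1, s.2.2.2.1, s.2.2.2.2) else (v, true, v, true)
  let new := if t.2.1 then s.1.set c t.1 else s.1
  (new, t)

-- B's loop body for one row (state: last, seen, out)
def stepB (cols : Nat) (st : Int × Bool × List (List Int)) (row : List Int) :
    Int × Bool × List (List Int) :=
  let (last, seen, acc) := st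
  let res := (List.range cols).foldl (stepBInner row) (row, 0, false, last, seen)
  let new := if res.2.2.2.2 then res.1.set (cols - 1) res.2.2.2.1 else res.1
  (res.2.2.2.1, res.2.2.2.2, acc ++ [new])

def transform_alt (grid : List (List Int)) : List (List Int) :=
  (grid.foldl (stepB (pyCols grid)) (0, false, [])).2.2

-- ===== PRECONDITION & SPEC =====
-- Pre_ excludes exactly the grids on which the Python A raises IndexError: those with some
-- row shorter than the first row (A indexes every row at all columns 0..cols-1).
def Pre_transform (grid : List (List Int)) : Prop :=
  ∀ row ∈ grid, pyCols grid ≤ row.length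

instance (grid : List (List Int)) : Decidable (Pre_transform grid) := by
  unfold Pre_transform; infer_instance

def pvWitness_transform : List (List Int) := [[1, 0, 0], [0, 2, 0], [0, 0, 0]]

def Spec_transform (grid : List (List Int)) (out : List (List Int)) : Prop := out = transform_alt grid
instance (grid : List (List Int)) (out : List (List Int)) : Decidable (Spec_transform grid out) := by
  unfold Spec_transform; infer_instance

-- ===== CLAIM (what is proved, stated in full; the proofs are below) =====
def Claim_equal_transform : Prop :=
  ∀ (grid : List (List Int)), Dom_transform grid → Pre_transform grid →
    Spec_transform grid (transform grid)

-- ===== LEMMAS AND PROOFS =====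

-- last-nonzero accumulator (Python's repeated `if v != 0: cur = v`)
def upd (o : Option Int) (x : Int) : Option Int := if x = 0 then o else some x

def lastNZ (l : List Int) : Option Int := l.foldl upd none

-- the slice row[a:cols]
def slice (row : List Int) (a cols : Nat) : List Int := (row.drop a).take (cols - a)

-- base with every index a ≤ j < cols replaced by the forward-fill value of row[a:j+1]
-- seeded with curOpt (kept when the fill value is absent)
def fillRowGen (a cols : Nat) (row : List Int) (curOpt : Option Int) (base : List Int) : List Int :=
  base.mapIdx (fun j x =>
    if a ≤ j ∧ j < cols then (((row.drop a).take (j + 1 - a)).foldl upd curOpt).getD x else x)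

-- base with every index a ≤ j < cols replaced by v
def fillConst (a cols : Nat) (v : Int) (base : List Int) : List Int :=
  base.mapIdx (fun j x => if a ≤ j ∧ j < cols then v else x)

-- row adjusted by the pending carry for the last column
def adjRow (cols : Nat) (last : Int) (seen : Bool) (row : List Int) : List Int :=
  if seen then row.set (cols - 1) last else row

lemma foldl_upd_eq_orElse (l : List Int) (o : Option Int) :
    l.foldl upd o = (l.foldl upd none).orElse (fun _ => o) := by
  induction l generalizing o with
  | nil => simp [List.foldl]
  | cons x t ih =>
    simp only [List.foldl]
    by_cases hx : x = 0
    · rw [show upd o x = o by simp [upd, hx], show upd none x = none by simp [upd, hx]]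
      exact ih o
    · rw [show upd o x = some x by simp [upd, hx], show upd none x = some x by simp [upd, hx]]
      rw [ih (some x)]
      cases t.foldl upd none <;> rfl

lemma lastNZ_none_iff (l : List Int) : lastNZ l = none ↔ ∀ x ∈ l, x = 0 := by
  induction l with
  | nil => unfold lastNZ; simp
  | cons x t ih =>
    unfold lastNZ at *
    simp only [List.foldl]
    by_cases hx : x = 0
    · rw [show upd none x = none by simp [upd, hx]]
      simp [ih, hx]
    · rw [show upd none x = some x by simp [upd, hx], foldl_upd_eq_orElse]
      cases h : t.foldl upd none <;> simp [hx]

lemma lastNZ_take_none (l : List Int) (n : Nat) (h : lastNZ l = none) :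
    lastNZ (l.take n) = none := by
  rw [lastNZ_none_iff] at h ⊢
  intro x hx; exact h x (List.mem_of_mem_take hx)

lemma length_fillRowGen (a cols : Nat) (row : List Int) (o : Option Int) (base : List Int) :
    (fillRowGen a cols row o base).length = base.length := by
  unfold fillRowGen
  exact List.length_mapIdx

-- taking one more element of a drop
lemma drop_take_succ (row : List Int) (a n : Nat) (ha : a < row.length) :
    (row.drop a).take (n + 1) = row.getD a 0 :: (row.drop (a + 1)).take n := by
  have h1 : row.drop a = row[a] :: row.drop (a + 1) := List.drop_eq_getElem_cons ha
  rw [h1, List.take_succ_cons, List.getD_eq_getElem row 0 ha]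

lemma drop_take_nil (row : List Int) (a n : Nat) (ha : row.length ≤ a) :
    (row.drop a).take n = [] := by
  simp [List.drop_eq_nil_of_le ha]

-- ===== characterisation of A's two fill loops =====

lemma foldl_modify_comm {α : Type} (l : List Nat) (g : Nat → α → α) (r : Nat) (out : List α) :
    l.foldl (fun o k => o.modify r (g k)) out
      = out.modify r (fun row => l.foldl (fun row k => g k row) row) := by
  induction l generalizing out with
  | nil =>
    apply List.ext_getElem?
    intro j
    simp only [List.foldl, List.getElem?_modify, Option.map_eq_map]
    cases out[j]? with
    | none => rfl
    | some x =>
      simp only [Option.map_some, Option.some.injEq]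
      split <;> rfl
  | cons k t ih =>
    simp only [List.foldl]
    rw [ih]
    apply List.ext_getElem?
    intro j
    simp only [List.getElem?_modify, Option.map_eq_map, Option.map_map]
    cases out[j]? with
    | none => rfl
    | some x =>
      simp only [Option.map_some, Option.some.injEq, Function.comp]
      split <;> rfl

lemma foldl_set_range' (v : Int) (n : Nat) : ∀ (a : Nat) (base : List Int),
    (List.range' a n).foldl (fun (row : List Int) k => row.set k v) base
      = base.mapIdx (fun j x => if a ≤ j ∧ j < a + n then v else x) := by
  induction n with
  | zero =>
    intro a base
    apply List.ext_getElem?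
    intro j
    simp only [List.range', List.foldl, List.getElem?_mapIdx]
    cases base[j]? with
    | none => rfl
    | some x =>
      simp only [Option.map_some, Option.some.injEq]
      rw [if_neg (by omega)]
  | succ n ih =>
    intro a base
    rw [List.range'_succ, List.foldl_cons, ih (a + 1) (base.set a v)]
    apply List.ext_getElem?
    intro j
    simp only [List.getElem?_mapIdx, List.getElem?_set]
    by_cases hj : j < base.length
    · rw [List.getElem?_eq_getElem hj]
      by_cases hja : a = j
      · subst hja
        rw [if_pos rfl, if_pos hj]
        simp only [Option.map_some, Option.some.injEq]
        rw [if_neg (by omega), if_pos (by omega)]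
      · rw [if_neg hja]
        simp only [Option.map_some, Option.some.injEq]
        split <;> split <;> first | rfl | omega
    · have hb : base[j]? = none := List.getElem?_eq_none (by omega)
      rw [hb]
      by_cases hja : a = j
      · subst hja
        rw [if_pos rfl, if_neg (by omega)]
        rfl
      · rw [if_neg hja]
        rfl

lemma foldl_set_eq_fillConst (a cols : Nat) (v : Int) (base : List Int) (ha : a ≤ cols) :
    (List.range' a (cols - a)).foldl (fun row k => row.set k v) base = fillConst a cols v base := by
  rw [foldl_set_range']
  unfold fillConst
  apply List.ext_getElem?
  intro j
  simp only [List.getElem?_mapIdx]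
  cases base[j]? with
  | none => rfl
  | some x =>
    simp only [Option.map_some, Option.some.injEq]
    split <;> split <;> first | rfl | omega

lemma rowFillA_char (r a cols : Nat) (v : Int) (out : List (List Int)) (ha : a ≤ cols) :
    rowFillA r a cols v out = out.modify r (fillConst a cols v) := by
  unfold rowFillA
  rw [foldl_modify_comm]
  congr 1
  funext row
  exact foldl_set_eq_fillConst a cols v row ha

lemma foldl_modify_range' {α : Type} (f : α → α) (n : Nat) : ∀ (r : Nat) (out : List α),
    (List.range' r n).foldl (fun o i => o.modify i f) out
      = out.mapIdx (fun i o => if r ≤ i ∧ i < r + n then f o else o) := by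
  induction n with
  | zero =>
    intro r out
    apply List.ext_getElem?
    intro j
    simp only [List.range', List.foldl, List.getElem?_mapIdx]
    cases out[j]? with
    | none => rfl
    | some x =>
      simp only [Option.map_some, Option.some.injEq]
      rw [if_neg (by omega)]
  | succ n ih =>
    intro r out
    rw [List.range'_succ, List.foldl_cons, ih (r + 1) (out.modify r f)]
    apply List.ext_getElem?
    intro j
    simp only [List.getElem?_mapIdx, List.getElem?_modify, Option.map_eq_map, Option.map_map]
    cases out[j]? with
    | none => rfl
    | some x =>
      simp only [Option.map_some, Option.some.injEq, Function.comp]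
      by_cases hrj : r = j
      · subst hrj
        rw [if_pos rfl, if_neg (by omega), if_pos (by omega)]
      · rw [if_neg hrj]
        split <;> split <;> first | rfl | omega

lemma colFillA_char (r rows cols : Nat) (v : Int) (out : List (List Int))
    (hlen : out.length = rows) (hr : r ≤ rows) :
    colFillA r rows cols v out
      = out.mapIdx (fun i o => if r ≤ i then o.set (cols - 1) v else o) := by
  unfold colFillA
  rw [foldl_modify_range']
  apply List.ext_getElem?
  intro j
  simp only [List.getElem?_mapIdx]
  by_cases hj : j < out.length
  · rw [List.getElem?_eq_getElem hj]
    simp only [Option.map_some, Option.some.injEq]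
    split <;> split <;> first | rfl | omega
  · rw [List.getElem?_eq_none (by omega)]
    rfl

-- ===== characterisation of A's inner loop over c =====

lemma lastNZ_slice_zero (row : List Int) (a cols : Nat) (hv : row.getD a 0 = 0) :
    lastNZ (slice row a cols) = lastNZ (slice row (a + 1) cols) := by
  unfold slice
  by_cases har : a < row.length
  · by_cases hac : a < cols
    · rw [show cols - a = (cols - (a + 1)) + 1 by omega, drop_take_succ row a _ har]
      unfold lastNZ
      rw [List.foldl_cons, hv, show upd none 0 = none by simp [upd]]
    · rw [show cols - a = 0 by omega, show cols - (a + 1) = 0 by omega,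
          List.take_zero, List.take_zero]
  · rw [drop_take_nil row a _ (by omega), drop_take_nil row (a + 1) _ (by omega)]

lemma lastNZ_slice_nonzero (row : List Int) (a cols : Nat) (v : Int)
    (hv : row.getD a 0 = v) (hv0 : v ≠ 0) (hac : a < cols) :
    lastNZ (slice row a cols) = some ((lastNZ (slice row (a + 1) cols)).getD v) := by
  have har : a < row.length := by
    by_contra h
    rw [List.getD_eq_default row 0 (by omega)] at hv
    exact hv0 hv.symm
  unfold slice lastNZ
  rw [show cols - a = (cols - (a + 1)) + 1 by omega, drop_take_succ row a _ har, List.foldl_cons,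
      hv, show upd none v = some v by simp [upd, hv0], foldl_upd_eq_orElse]
  cases ((row.drop (a + 1)).take (cols - (a + 1))).foldl upd none <;> rfl

lemma set_fillConst (a cols : Nat) (v : Int) (base : List Int) (hac : a < cols) :
    (fillConst a cols v base).set (cols - 1) v = fillConst a cols v base := by
  apply List.ext_getElem?
  intro j
  rw [List.getElem?_set]
  simp only [List.length_mapIdx, fillConst]
  by_cases hj : cols - 1 = j
  · rw [if_pos hj, ← hj]
    by_cases hlt : cols - 1 < base.length
    · rw [if_pos hlt, List.getElem?_mapIdx, List.getElem?_eq_getElem hlt]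
      simp only [Option.map_some, Option.some.injEq]
      rw [if_pos ⟨by omega, by omega⟩]
    · rw [if_neg hlt, List.getElem?_mapIdx, List.getElem?_eq_none (by omega)]
      rfl
  · rw [if_neg hj]

lemma fill_step (a cols : Nat) (row base : List Int) (v : Int)
    (hv : row.getD a 0 = v) (hv0 : v ≠ 0) (ha : a < cols) :
    fillRowGen (a + 1) cols row none (fillConst a cols v base) = fillRowGen a cols row none base := by
  have har : a < row.length := by
    by_contra h
    rw [List.getD_eq_default row 0 (by omega)] at hv
    exact hv0 hv.symm
  unfold fillRowGen fillConst
  apply List.ext_getElem?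
  intro j
  simp only [List.getElem?_mapIdx, Option.map_map]
  cases base[j]? with
  | none => rfl
  | some x =>
    simp only [Option.map_some, Option.some.injEq, Function.comp]
    by_cases hja : a ≤ j
    · by_cases hjc : j < cols
      · by_cases hja1 : a + 1 ≤ j
        · rw [if_pos (show a + 1 ≤ j ∧ j < cols from ⟨hja1, hjc⟩),
              if_pos (show a ≤ j ∧ j < cols from ⟨hja, hjc⟩),
              if_pos (show a ≤ j ∧ j < cols from ⟨hja, hjc⟩),
              show j + 1 - a = (j - a) + 1 by omega, drop_take_succ row a _ har,
              show j + 1 - (a + 1) = j - a by omega, List.foldl_cons, hv,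
              show upd none v = some v by simp [upd, hv0],
              foldl_upd_eq_orElse _ (some v)]
          cases ((row.drop (a + 1)).take (j - a)).foldl upd none <;> rfl
        · have hje : j = a := by omega
          subst hje
          rw [if_neg (show ¬(j + 1 ≤ j ∧ j < cols) by omega),
              if_pos (show j ≤ j ∧ j < cols from ⟨le_refl j, hjc⟩),
              if_pos (show j ≤ j ∧ j < cols from ⟨le_refl j, hjc⟩),
              show j + 1 - j = 0 + 1 by omega, drop_take_succ row j 0 har, hv]
          simp [List.foldl, upd, hv0]
      · rw [if_neg (show ¬(a + 1 ≤ j ∧ j < cols) by omega),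
            if_neg (show ¬(a ≤ j ∧ j < cols) by omega),
            if_neg (show ¬(a ≤ j ∧ j < cols) by omega)]
    · rw [if_neg (show ¬(a + 1 ≤ j ∧ j < cols) by omega),
          if_neg (show ¬(a ≤ j ∧ j < cols) by omega),
          if_neg (show ¬(a ≤ j ∧ j < cols) by omega)]

lemma fill_zero_step (a cols : Nat) (row base : List Int)
    (hv : row.getD a 0 = 0) :
    fillRowGen (a + 1) cols row none base = fillRowGen a cols row none base := by
  unfold fillRowGen
  apply List.ext_getElem?
  intro j
  simp only [List.getElem?_mapIdx]
  cases base[j]? with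
  | none => rfl
  | some x =>
    simp only [Option.map_some, Option.some.injEq]
    by_cases hja : a ≤ j
    · by_cases hjc : j < cols
      · by_cases hja1 : a + 1 ≤ j
        · rw [if_pos ⟨hja1, hjc⟩, if_pos ⟨hja, hjc⟩]
          by_cases har : a < row.length
          · rw [show j + 1 - a = (j - a) + 1 by omega, drop_take_succ row a _ har, List.foldl_cons,
                hv, show upd none 0 = none by simp [upd], show j + 1 - (a + 1) = j - a by omega]
          · rw [drop_take_nil row a _ (by omega), drop_take_nil row (a + 1) _ (by omega)]
        · have hje : j = a := by omega
          subst hje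
          rw [if_neg (by omega), if_pos ⟨hja, hjc⟩]
          by_cases har : j < row.length
          · rw [show j + 1 - j = 0 + 1 by omega, drop_take_succ row j 0 har, hv]
            simp [upd]
          · rw [drop_take_nil row j _ (by omega)]
            rfl
      · rw [if_neg (by omega), if_neg (by omega)]
    · rw [if_neg (by omega), if_neg (by omega)]

lemma fillConst_eq_fillRowGen_none (a cols : Nat) (row base : List Int) (v : Int)
    (hv : row.getD a 0 = v) (hv0 : v ≠ 0) (hac : a < cols)
    (htail : lastNZ (slice row (a + 1) cols) = none) :
    fillConst a cols v base = fillRowGen a cols row none base := by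
  have har : a < row.length := by
    by_contra h
    rw [List.getD_eq_default row 0 (by omega)] at hv
    exact hv0 hv.symm
  unfold fillConst fillRowGen
  apply List.ext_getElem?
  intro j
  simp only [List.getElem?_mapIdx]
  cases base[j]? with
  | none => rfl
  | some x =>
    simp only [Option.map_some, Option.some.injEq]
    by_cases hjc : a ≤ j ∧ j < cols
    · rw [if_pos hjc, if_pos hjc]
      rw [show j + 1 - a = (j - a) + 1 by omega, drop_take_succ row a _ har, List.foldl_cons,
          hv, show upd none v = some v by simp [upd, hv0], foldl_upd_eq_orElse]
      have hpref : lastNZ ((row.drop (a + 1)).take (j - a)) = none := by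
        have : (row.drop (a + 1)).take (j - a) = ((row.drop (a + 1)).take (cols - (a + 1))).take (j - a) := by
          rw [List.take_take, Nat.min_eq_left (by omega)]
        rw [this]
        exact lastNZ_take_none _ _ htail
      unfold lastNZ at hpref
      rw [hpref]
      rfl
    · rw [if_neg hjc, if_neg hjc]

lemma innerA_from (row : List Int) (r rows cols : Nat) :
    ∀ (n a : Nat) (out : List (List Int)), n = cols - a → a ≤ cols →
    out.length = rows → r < rows →
    (List.range' a (cols - a)).foldl (fun out c =>
        let v := row.getD c 0
        if v = 0 then out
        else colFillA r rows cols v (rowFillA r c cols v out)) out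
      = match lastNZ (slice row a cols) with
        | none => out
        | some w => out.mapIdx (fun i o =>
            if i = r then fillRowGen a cols row none o
            else if r ≤ i then o.set (cols - 1) w else o) := by
  intro n
  induction n with
  | zero =>
    intro a out hn ha hlen hr
    have hac : a = cols := by omega
    subst hac
    rw [show a - a = 0 by omega]
    unfold slice
    rw [show a - a = 0 by omega, List.take_zero]
    rfl
  | succ n ih =>
    intro a out hn ha hlen hr
    have hac : a < cols := by omega
    rw [show cols - a = n + 1 by omega, List.range'_succ, List.foldl_cons]
    show (List.range' (a + 1) n).foldl _ (if row.getD a 0 = 0 then out else _) = _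
    rw [show n = cols - (a + 1) by omega]
    by_cases hv : row.getD a 0 = 0
    · rw [if_pos hv]
      rw [ih (a + 1) out (by omega) (by omega) hlen hr]
      rw [lastNZ_slice_zero row a cols hv]
      cases htail : lastNZ (slice row (a + 1) cols) with
      | none => rfl
      | some w =>
        apply List.ext_getElem?
        intro j
        simp only [List.getElem?_mapIdx]
        cases out[j]? with
        | none => rfl
        | some o =>
          simp only [Option.map_some, Option.some.injEq]
          by_cases hjr : j = r
          · subst hjr
            rw [if_pos rfl, if_pos rfl, fill_zero_step a cols row o hv]
          · rw [if_neg hjr, if_neg hjr]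
    · rw [if_neg hv]
      set v := row.getD a 0 with hvdef
      rw [rowFillA_char r a cols v out (by omega),
          colFillA_char r rows cols v _ (by rw [List.length_modify]; exact hlen) (by omega)]
      rw [ih (a + 1) _ (by omega) (by omega)
            (by rw [List.length_mapIdx, List.length_modify]; exact hlen) hr]
      rw [lastNZ_slice_nonzero row a cols v rfl hv hac]
      cases htail : lastNZ (slice row (a + 1) cols) with
      | none =>
        simp only [Option.getD_none]
        apply List.ext_getElem?
        intro j
        simp only [List.getElem?_mapIdx, List.getElem?_modify, Option.map_eq_map, Option.map_map]
        cases out[j]? with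
        | none => rfl
        | some o =>
          simp only [Option.map_some, Option.some.injEq, Function.comp]
          by_cases hjr : j = r
          · subst hjr
            simp only [if_true, le_refl]
            rw [set_fillConst a cols v o hac,
                fillConst_eq_fillRowGen_none a cols row o v rfl hv hac htail]
          · rw [if_neg hjr, if_neg (Ne.symm hjr)]
      | some w =>
        simp only [Option.getD_some]
        apply List.ext_getElem?
        intro j
        simp only [List.getElem?_mapIdx, List.getElem?_modify, Option.map_eq_map, Option.map_map]
        cases out[j]? with
        | none => rfl
        | some o =>
          simp only [Option.map_some, Option.some.injEq, Function.comp]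
          by_cases hjr : j = r
          · subst hjr
            simp only [if_true, le_refl]
            rw [set_fillConst a cols v o hac, fill_step a cols row o v rfl hv hac]
          · rw [if_neg hjr, if_neg (Ne.symm hjr)]
            by_cases hrj : r ≤ j
            · simp only [if_pos hrj, List.set_set]
              rw [if_neg hjr]
            · simp only [if_neg hrj]
              rw [if_neg hjr]

-- ===== characterisation of B's inner loop over c =====

lemma fillRowGen_step (a cols : Nat) (row new : List Int) (curOpt : Option Int) (hac : a < cols) :
    fillRowGen (a + 1) cols row (upd curOpt (row.getD a 0))
        (match upd curOpt (row.getD a 0) with | none => new | some c => new.set a c)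
      = fillRowGen a cols row curOpt new := by
  have hval : ((row.drop a).take (a + 1 - a)).foldl upd curOpt = upd curOpt (row.getD a 0) := by
    by_cases har : a < row.length
    · rw [show a + 1 - a = 0 + 1 by omega, drop_take_succ row a 0 har]
      rfl
    · rw [drop_take_nil row a _ (by omega), List.getD_eq_default row 0 (by omega)]
      simp [upd]
  cases hupd : upd curOpt (row.getD a 0) with
  | none =>
    have hv : row.getD a 0 = 0 := by
      by_contra hv
      rw [upd, if_neg hv] at hupd
      exact Option.some_ne_none _ hupd
    have hcur : curOpt = none := by
      rw [upd, if_pos hv] at hupd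
      exact hupd
    rw [hcur]
    show fillRowGen (a + 1) cols row none new = fillRowGen a cols row none new
    exact fill_zero_step a cols row new hv
  | some c =>
    show fillRowGen (a + 1) cols row (some c) (new.set a c) = fillRowGen a cols row curOpt new
    unfold fillRowGen
    apply List.ext_getElem?
    intro j
    simp only [List.getElem?_mapIdx, List.getElem?_set]
    by_cases hja : a = j
    · rw [if_pos hja]
      by_cases hlt : a < new.length
      · rw [if_pos hlt, ← hja, List.getElem?_eq_getElem hlt]
        simp only [Option.map_some, Option.some.injEq]
        rw [if_neg (by omega), if_pos ⟨le_refl a, hac⟩, hval, hupd]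
        rfl
      · rw [if_neg hlt, ← hja, List.getElem?_eq_none (by omega)]
        rfl
    · rw [if_neg hja]
      cases new[j]? with
      | none => rfl
      | some x =>
        simp only [Option.map_some, Option.some.injEq]
        by_cases hjc : a ≤ j ∧ j < cols
        · rw [if_pos (show a + 1 ≤ j ∧ j < cols from ⟨by omega, hjc.2⟩), if_pos hjc]
          by_cases har : a < row.length
          · rw [show j + 1 - a = (j - a) + 1 by omega, drop_take_succ row a _ har, List.foldl_cons,
                show j + 1 - (a + 1) = j - a by omega, hupd]
          · rw [drop_take_nil row a _ (by omega), drop_take_nil row (a + 1) _ (by omega)]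
            have hco : curOpt = some c := by
              rw [upd, if_pos (by rw [List.getD_eq_default row 0 (by omega)])] at hupd
              exact hupd
            rw [hco]
        · rw [if_neg (show ¬(a + 1 ≤ j ∧ j < cols) by omega), if_neg hjc]

lemma innerB_from (row : List Int) (cols : Nat) :
    ∀ (n a : Nat) (new : List Int) (cur last : Int) (curSeen seen : Bool),
    n = cols - a → a ≤ cols →
    (List.range' a (cols - a)).foldl (stepBInner row) (new, cur, curSeen, last, seen)
      = (fillRowGen a cols row (if curSeen then some cur else none) new,
         match lastNZ (slice row a cols) with
         | none => (cur, curSeen, last, seen)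
         | some w => (w, true, w, true)) := by
  intro n
  induction n with
  | zero =>
    intro a new cur last curSeen seen hn ha
    have hac : a = cols := by omega
    subst hac
    rw [show a - a = 0 by omega]
    unfold slice
    rw [show a - a = 0 by omega, List.take_zero]
    show (new, cur, curSeen, last, seen) = _
    have : fillRowGen a a row (if curSeen then some cur else none) new = new := by
      unfold fillRowGen
      apply List.ext_getElem?
      intro j
      simp only [List.getElem?_mapIdx]
      cases new[j]? with
      | none => rfl
      | some x =>
        simp only [Option.map_some, Option.some.injEq]
        rw [if_neg (by omega)]
    rw [this]
    rfl
  | succ n ih =>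
    intro a new cur last curSeen seen hn ha
    have hac : a < cols := by omega
    rw [show cols - a = n + 1 by omega, List.range'_succ, List.foldl_cons,
        show n = cols - (a + 1) by omega]
    by_cases hv : row.getD a 0 = 0
    · have hstep : stepBInner row (new, cur, curSeen, last, seen) a
          = ((if curSeen then new.set a cur else new), cur, curSeen, last, seen) := by
        simp only [stepBInner, if_pos hv]
      rw [hstep, ih (a + 1) _ cur last curSeen seen (by omega) (by omega)]
      have hupd : upd (if curSeen then some cur else none) (row.getD a 0)
          = (if curSeen then some cur else none) := by
        rw [upd, if_pos hv]
      have hfs := fillRowGen_step a cols row new (if curSeen then some cur else none) hac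
      rw [hupd] at hfs
      have hmatch : (if curSeen then new.set a cur else new)
          = (match (if curSeen then some cur else none) with
             | none => new | some c => new.set a c : List Int) := by
        cases curSeen <;> rfl
      rw [hmatch, hfs, lastNZ_slice_zero row a cols hv]
    · have hstep : stepBInner row (new, cur, curSeen, last, seen) a
          = (new.set a (row.getD a 0), row.getD a 0, true, row.getD a 0, true) := by
        simp only [stepBInner, if_neg hv]
        rfl
      rw [hstep, ih (a + 1) _ (row.getD a 0) (row.getD a 0) true true (by omega) (by omega)]
      have hupd : upd (if curSeen then some cur else none) (row.getD a 0)
          = some (row.getD a 0) := by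
        rw [upd, if_neg hv]
      have hfs := fillRowGen_step a cols row new (if curSeen then some cur else none) hac
      rw [hupd] at hfs
      rw [show (if (true : Bool) = true then some (row.getD a 0) else none)
            = some (row.getD a 0) from rfl,
          show new.set a (row.getD a 0)
            = (match some (row.getD a 0) with
               | none => new | some c => new.set a c : List Int) from rfl,
          hfs, lastNZ_slice_nonzero row a cols (row.getD a 0) rfl hv hac]
      cases lastNZ (slice row (a + 1) cols) <;> rfl

lemma innerB_char (row : List Int) (cols : Nat) (last : Int) (seen : Bool) :
    (List.range cols).foldl (stepBInner row) (row, 0, false, last, seen)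
      = (fillRowGen 0 cols row none row,
         match lastNZ (row.take cols) with
         | none => ((0 : Int), false, last, seen)
         | some w => (w, true, w, true)) := by
  rw [List.range_eq_range', show cols = cols - 0 by omega]
  rw [innerB_from row cols (cols - 0) 0 row 0 last false seen rfl (by omega)]
  rw [show cols - 0 = cols by omega]
  unfold slice
  rw [List.drop_zero, show cols - 0 = cols by omega]
  rfl

-- ===== assembling the two row results =====

lemma fillRowGen_of_none (cols : Nat) (row base : List Int)
    (h : lastNZ (row.take cols) = none) :
    fillRowGen 0 cols row none base = base := by
  unfold fillRowGen
  apply List.ext_getElem?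
  intro j
  simp only [List.getElem?_mapIdx, List.drop_zero]
  cases base[j]? with
  | none => rfl
  | some x =>
    simp only [Option.map_some, Option.some.injEq]
    by_cases hjc : 0 ≤ j ∧ j < cols
    · rw [if_pos hjc]
      have hpref : lastNZ (row.take (j + 1 - 0)) = none := by
        have : row.take (j + 1 - 0) = (row.take cols).take (j + 1 - 0) := by
          rw [List.take_take, Nat.min_eq_left (by omega)]
        rw [this]
        exact lastNZ_take_none _ _ h
      unfold lastNZ at hpref
      rw [hpref]
      rfl
    · rw [if_neg hjc]

lemma rowB_eq_rowA (cols : Nat) (row : List Int) (last w : Int) (seen : Bool)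
    (h : lastNZ (row.take cols) = some w) :
    (fillRowGen 0 cols row none row).set (cols - 1) w
      = fillRowGen 0 cols row none (adjRow cols last seen row) := by
  have hcols : 0 < cols := by
    by_contra hc
    rw [show cols = 0 by omega, List.take_zero] at h
    have hx : (none : Option Int) = some w := h
    simp at hx
  have hval : ∀ x : Int, (((row.drop 0).take (cols - 1 + 1 - 0)).foldl upd none).getD x = w := by
    intro x
    rw [List.drop_zero, show cols - 1 + 1 - 0 = cols by omega]
    unfold lastNZ at h
    rw [h]
    rfl
  apply List.ext_getElem?
  intro j
  by_cases hj : cols - 1 = j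
  · subst hj
    rw [List.getElem?_set, if_pos rfl]
    by_cases hlt : cols - 1 < row.length
    · rw [if_pos (by rw [length_fillRowGen]; exact hlt)]
      unfold fillRowGen adjRow
      rw [List.getElem?_mapIdx]
      cases seen with
      | false =>
        rw [show (if (false : Bool) = true then row.set (cols - 1) last else row) = row from rfl,
            List.getElem?_eq_getElem hlt]
        simp only [Option.map_some, Option.some.injEq]
        rw [if_pos ⟨Nat.zero_le _, by omega⟩, hval]
      | true =>
        rw [show (if (true : Bool) = true then row.set (cols - 1) last else row)
              = row.set (cols - 1) last from rfl,
            List.getElem?_set, if_pos rfl, if_pos hlt]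
        simp only [Option.map_some, Option.some.injEq]
        rw [if_pos ⟨Nat.zero_le _, by omega⟩, hval]
    · rw [if_neg (by rw [length_fillRowGen]; exact hlt)]
      unfold fillRowGen adjRow
      rw [List.getElem?_mapIdx]
      cases seen with
      | false =>
        rw [show (if (false : Bool) = true then row.set (cols - 1) last else row) = row from rfl,
            List.getElem?_eq_none (by omega)]
        rfl
      | true =>
        rw [show (if (true : Bool) = true then row.set (cols - 1) last else row)
              = row.set (cols - 1) last from rfl,
            List.getElem?_eq_none (by rw [List.length_set]; omega)]
        rfl
  · rw [List.getElem?_set, if_neg hj]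
    unfold fillRowGen adjRow
    rw [List.getElem?_mapIdx, List.getElem?_mapIdx]
    have hbase : (if seen then row.set (cols - 1) last else row)[j]? = row[j]? := by
      cases seen with
      | false => rfl
      | true =>
        show (row.set (cols - 1) last)[j]? = _
        rw [List.getElem?_set, if_neg hj]
    rw [hbase]

-- ===== the outer induction =====

lemma innerA_char (row : List Int) (r rows cols : Nat) (out : List (List Int))
    (hlen : out.length = rows) (hr : r < rows) :
    innerA row r rows cols out
      = match lastNZ (row.take cols) with
        | none => out
        | some w => out.mapIdx (fun i o =>
            if i = r then fillRowGen 0 cols row none o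
            else if r ≤ i then o.set (cols - 1) w else o) := by
  unfold innerA
  rw [List.range_eq_range', show List.range' 0 cols = List.range' 0 (cols - 0) by rw [Nat.sub_zero]]
  rw [innerA_from row r rows cols (cols - 0) 0 out rfl (by omega) hlen hr]
  unfold slice
  rw [List.drop_zero, Nat.sub_zero]

lemma innerA_char_none (row : List Int) (r rows cols : Nat) (out : List (List Int))
    (hlen : out.length = rows) (hr : r < rows) (hnz : lastNZ (row.take cols) = none) :
    innerA row r rows cols out = out := by
  rw [innerA_char row r rows cols out hlen hr, hnz]

lemma innerA_char_some (row : List Int) (r rows cols : Nat) (out : List (List Int)) (w : Int)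
    (hlen : out.length = rows) (hr : r < rows) (hnz : lastNZ (row.take cols) = some w) :
    innerA row r rows cols out
      = out.mapIdx (fun i o =>
          if i = r then fillRowGen 0 cols row none o
          else if r ≤ i then o.set (cols - 1) w else o) := by
  rw [innerA_char row r rows cols out hlen hr, hnz]

lemma adj_set (cols : Nat) (last w : Int) (seen : Bool) (t : List Int) :
    (adjRow cols last seen t).set (cols - 1) w = adjRow cols w true t := by
  cases seen with
  | false => rfl
  | true =>
    show (t.set (cols - 1) last).set (cols - 1) w = t.set (cols - 1) w
    rw [List.set_set]

lemma mapIdx_three (acc : List (List Int)) (b : List Int) (rest : List (List Int)) (r cols : Nat)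
    (hacc : acc.length = r) (F : List Int → List Int) (w : Int) :
    (acc ++ b :: rest).mapIdx
        (fun i o => if i = r then F o else if r ≤ i then o.set (cols - 1) w else o)
      = acc ++ F b :: rest.map (fun o => o.set (cols - 1) w) := by
  apply List.ext_getElem?
  intro j
  rw [List.getElem?_mapIdx, List.getElem?_append, List.getElem?_append]
  by_cases hj : j < acc.length
  · rw [if_pos hj, if_pos hj]
    cases acc[j]? with
    | none => rfl
    | some x =>
      simp only [Option.map_some, Option.some.injEq]
      rw [if_neg (by omega), if_neg (by omega)]
  · rw [if_neg hj, if_neg hj]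
    by_cases hjr : j = acc.length
    · rw [show j - acc.length = 0 by omega, List.getElem?_cons_zero, List.getElem?_cons_zero]
      simp only [Option.map_some, Option.some.injEq]
      rw [if_pos (by omega)]
    · rw [show j - acc.length = (j - acc.length - 1) + 1 by omega,
          List.getElem?_cons_succ, List.getElem?_cons_succ, List.getElem?_map]
      cases rest[j - acc.length - 1]? with
      | none => rfl
      | some x =>
        simp only [Option.map_some, Option.some.injEq]
        rw [if_neg (by omega), if_pos (by omega)]

lemma outer_inv (grid0 : List (List Int)) (cols : Nat)
    (hpre : ∀ row ∈ grid0, cols ≤ row.length) :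
    ∀ (k r : Nat) (acc : List (List Int)) (last : Int) (seen : Bool),
      k = grid0.length - r → r ≤ grid0.length → acc.length = r →
      (List.range' r (grid0.length - r)).foldl
          (fun out i => innerA (grid0.getD i []) i grid0.length cols out)
          (acc ++ (grid0.drop r).map (adjRow cols last seen))
        = ((grid0.drop r).foldl (stepB cols) (last, seen, acc)).2.2 := by
  intro k
  induction k with
  | zero =>
    intro r acc last seen hk hr hacc
    rw [show grid0.length - r = 0 by omega, List.drop_eq_nil_of_le (by omega)]
    simp [List.foldl]
  | succ k ih =>
    intro r acc last seen hk hr hacc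
    have hrlt : r < grid0.length := by omega
    have hdrop : grid0.drop r = grid0[r] :: grid0.drop (r + 1) := List.drop_eq_getElem_cons hrlt
    have hget : grid0.getD r [] = grid0[r] := List.getD_eq_getElem grid0 [] hrlt
    rw [show grid0.length - r = k + 1 by omega, List.range'_succ, List.foldl_cons, hdrop,
        List.map_cons, List.foldl_cons, hget,
        show List.range' (r + 1) k = List.range' (r + 1) (grid0.length - (r + 1)) by
          rw [show grid0.length - (r + 1) = k by omega]]
    have hlen : (acc ++ adjRow cols last seen grid0[r]
        :: (grid0.drop (r + 1)).map (adjRow cols last seen)).length = grid0.length := by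
      simp only [List.length_append, List.length_cons, List.length_map, List.length_drop, hacc]
      omega
    cases hnz : lastNZ (grid0[r].take cols) with
    | none =>
      rw [innerA_char_none grid0[r] r grid0.length cols _ hlen hrlt hnz]
      have hB := innerB_char grid0[r] cols last seen
      rw [hnz] at hB
      have hsb : stepB cols (last, seen, acc) grid0[r]
          = (last, seen, acc ++ [adjRow cols last seen grid0[r]]) := by
        simp only [stepB, hB, fillRowGen_of_none cols grid0[r] grid0[r] hnz, adjRow]
      rw [hsb,
          show acc ++ adjRow cols last seen grid0[r]
              :: (grid0.drop (r + 1)).map (adjRow cols last seen)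
            = (acc ++ [adjRow cols last seen grid0[r]])
              ++ (grid0.drop (r + 1)).map (adjRow cols last seen) by simp]
      exact ih (r + 1) (acc ++ [adjRow cols last seen grid0[r]]) last seen (by omega) (by omega)
        (by simp [hacc])
    | some w =>
      rw [innerA_char_some grid0[r] r grid0.length cols _ w hlen hrlt hnz]
      have hB := innerB_char grid0[r] cols last seen
      rw [hnz] at hB
      have hsb : stepB cols (last, seen, acc) grid0[r]
          = (w, true, acc ++ [(fillRowGen 0 cols grid0[r] none grid0[r]).set (cols - 1) w]) := by
        simp only [stepB, hB]
        rw [if_pos trivial]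
      rw [hsb, mapIdx_three acc _ _ r cols hacc (fillRowGen 0 cols grid0[r] none) w,
          ← rowB_eq_rowA cols grid0[r] last w seen hnz, List.map_map,
          show List.map ((fun o => o.set (cols - 1) w) ∘ adjRow cols last seen)
                (List.drop (r + 1) grid0)
              = List.map (adjRow cols w true) (List.drop (r + 1) grid0) from
            List.map_congr_left (fun t _ => adj_set cols last w seen t),
          show acc ++ (fillRowGen 0 cols grid0[r] none grid0[r]).set (cols - 1) w
              :: (grid0.drop (r + 1)).map (adjRow cols w true)
            = (acc ++ [(fillRowGen 0 cols grid0[r] none grid0[r]).set (cols - 1) w])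
              ++ (grid0.drop (r + 1)).map (adjRow cols w true) by simp]
      exact ih (r + 1) (acc ++ [(fillRowGen 0 cols grid0[r] none grid0[r]).set (cols - 1) w]) w true
        (by omega) (by omega) (by simp [hacc])

-- ===== VERDICT (by name: the statement is the Claim_ definition above) =====
theorem transform_spec : Claim_equal_transform := by
  intro grid _ hpre
  unfold Pre_transform at hpre
  unfold Spec_transform
  show transform grid = transform_alt grid
  unfold transform transform_alt
  show (List.range grid.length).foldl
      (fun out r => innerA (grid.getD r []) r grid.length (pyCols grid) out) grid
    = (grid.foldl (stepB (pyCols grid)) (0, false, [])).2.2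
  rw [List.range_eq_range',
      show List.range' 0 grid.length = List.range' 0 (grid.length - 0) by rw [Nat.sub_zero]]
  have hmap : (grid.drop 0).map (adjRow (pyCols grid) 0 false) = grid := by
    rw [List.drop_zero]
    exact (List.map_congr_left (fun row _ => rfl)).trans (List.map_id grid)
  have h := outer_inv grid (pyCols grid) hpre grid.length 0 [] 0 false (by omega) (by omega) rfl
  rw [List.nil_append, hmap, List.drop_zero] at h
  exact h
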